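-- pv_equiv track=rewrite | github.com/ncread/Advent-of-Code | 2025/day6/6.py | grand_total
-- ===== SOURCE A (Python) =====
-- import math
--
-- def grand_total(operands, operators):
--     column_calcs = []
--     for j in range(0,len(operators)): #columns
--         nums = []
--         for i in range(0,len(operands)): #numeric rows
--             col_operator = operators[j]
--             nums.append(operands[i][j])
--         column_calcs.append(math.prod(nums)) if col_operator == '*' else column_calcs.append(sum(nums))
--
--     return sum(column_calcs)
-- ===== SOURCE B (Python) =====
-- def grand_total(operands, operators):
--     # Row-major single pass: per-column running accumulators (1 for '*', 0 for '+'),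
--     # updated row by row, then summed.
--     col_totals = [1 if op == '*' else 0 for op in operators]
--     for row in operands:
--         col_totals = [t * row[j] if operators[j] == '*' else t + row[j]
--                       for j, t in enumerate(col_totals)]
--     return sum(col_totals)
-- ===== Notes on version B (the rewrite author's own statement) =====
-- stated objective: alternative
-- what changed: B traverses row-major in one pass maintaining a running accumulator per column (seeded with 1 for '*' columns, 0 for '+' columns), instead of gathering each column into a list and then reducing it column by column.
import Mathlib
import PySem

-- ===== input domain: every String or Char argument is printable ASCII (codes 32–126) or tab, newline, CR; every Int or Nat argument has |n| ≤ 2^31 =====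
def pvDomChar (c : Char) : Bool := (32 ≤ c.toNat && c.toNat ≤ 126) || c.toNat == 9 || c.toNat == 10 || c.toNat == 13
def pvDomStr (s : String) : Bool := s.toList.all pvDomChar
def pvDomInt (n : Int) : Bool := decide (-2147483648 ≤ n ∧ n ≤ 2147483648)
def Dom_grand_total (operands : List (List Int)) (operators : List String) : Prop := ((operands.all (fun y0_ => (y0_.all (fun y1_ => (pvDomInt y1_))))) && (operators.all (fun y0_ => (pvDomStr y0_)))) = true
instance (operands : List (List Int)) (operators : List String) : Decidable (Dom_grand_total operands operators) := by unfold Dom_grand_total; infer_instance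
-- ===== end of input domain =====

-- B traverses row-major with running per-column accumulators instead of A's column-major
-- gather-then-reduce; return values only (neither version mutates its arguments).

-- ===== PORT A =====
-- column-major: for each column j, gather nums = [operands[i][j] for i], remember the
-- operator read in the inner loop (Option: none until assigned), then append prod or sum.
-- Indexing is pyGetD; exact here because inside Pre_ every index used is in range.
def grand_total (operands : List (List Int)) (operators : List String) : Int :=
  let column_calcs :=
    (PySem.List.pyRange 0 operators.length 1).foldl
      (fun (acc : List Int) j =>
        let st :=
          (PySem.List.pyRange 0 operands.length 1).foldl
            (fun (st : List Int × Option String) i =>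
              let colOp := some (PySem.List.pyGetD operators j "")
              (st.1 ++ [PySem.List.pyGetD (PySem.List.pyGetD operands i []) j 0], colOp))
            ([], none)
        acc ++ [if st.2 = some "*" then st.1.prod else st.1.sum])
      []
  column_calcs.sum

-- ===== PORT B =====
-- row-major single pass: col_totals seeded with 1 for '*' / 0 otherwise, rebuilt row by row.
def grand_total_alt (operands : List (List Int)) (operators : List String) : Int :=
  let init := operators.map (fun op => if op = "*" then (1 : Int) else 0)
  let totals := operands.foldl
    (fun (tot : List Int) row =>
      (PySem.List.enumerate tot 0).map
        (fun jt =>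
          if PySem.List.pyGetD operators jt.1 "" = "*"
          then jt.2 * PySem.List.pyGetD row jt.1 0
          else jt.2 + PySem.List.pyGetD row jt.1 0))
    init
  totals.sum

-- ===== PRECONDITION & SPEC =====
-- Pre_ excludes exactly the inputs on which Python A raises: UnboundLocalError when operands
-- is empty while operators is not (col_operator never assigned; B would return the number of
-- '*' operators there), IndexError when some row is shorter than operators (B raises too).
def Pre_grand_total (operands : List (List Int)) (operators : List String) : Prop :=
  operators = [] ∨ (operands ≠ [] ∧ ∀ row ∈ operands, operators.length ≤ row.length)
instance (operands : List (List Int)) (operators : List String) : Decidable (Pre_grand_total operands operators) := by unfold Pre_grand_total; infer_instance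
def pvWitness_grand_total : List (List Int) × List String := ([[2, 3], [4, 5]], ["*", "+"])

def Spec_grand_total (operands : List (List Int)) (operators : List String) (out : Int) : Prop := out = grand_total_alt operands operators
instance (operands : List (List Int)) (operators : List String) (out : Int) : Decidable (Spec_grand_total operands operators out) := by unfold Spec_grand_total; infer_instance

-- ===== CLAIM (what is proved, stated in full; the proofs are below) =====
def Claim_equal_grand_total : Prop := ∀ (operands : List (List Int)) (operators : List String), Dom_grand_total operands operators → Pre_grand_total operands operators → Spec_grand_total operands operators (grand_total operands operators)

-- ===== LEMMAS AND PROOFS =====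

-- A's inner loop (as a fold over the rows themselves): nums accumulates the column,
-- the operator component becomes `some op_j` as soon as one row is processed.
theorem pvA_inner_fold (operators : List String) (j : Int) (xs : List (List Int)) :
    ∀ (acc : List Int) (o : Option String),
      xs.foldl
        (fun (st : List Int × Option String) row =>
          (st.1 ++ [PySem.List.pyGetD row j 0], some (PySem.List.pyGetD operators j "")))
        (acc, o)
      = (acc ++ xs.map (fun row => PySem.List.pyGetD row j 0),
         if xs = [] then o else some (PySem.List.pyGetD operators j "")) := by
  induction xs with
  | nil => intro acc o; simp
  | cons x xs ih => intro acc o; simp [List.foldl_cons, ih]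

-- enumerating a list built by mapping over an enumeration keeps the same indices
theorem pvEnum_map_enum {α β : Type} (tot : List α) (φ : Int × α → β) :
    PySem.List.enumerate ((PySem.List.enumerate tot 0).map φ) 0
    = (PySem.List.enumerate tot 0).map (fun jt => (jt.1, φ jt)) := by
  apply List.ext_getElem
  · simp [PySem.List.length_enumerate]
  · intro k h1 h2
    simp [PySem.List.getElem_enumerate] at *

-- B's outer loop: folding the per-row update over the rows computes, per column index,
-- the fold of that column onto the seed.
theorem pvB_fold (operators : List String) (xs : List (List Int)) :
    ∀ (tot : List Int),
      xs.foldl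
        (fun (tot : List Int) row =>
          (PySem.List.enumerate tot 0).map
            (fun jt =>
              if PySem.List.pyGetD operators jt.1 "" = "*"
              then jt.2 * PySem.List.pyGetD row jt.1 0
              else jt.2 + PySem.List.pyGetD row jt.1 0)) tot
      = (PySem.List.enumerate tot 0).map
          (fun jt =>
            xs.foldl
              (fun a row =>
                if PySem.List.pyGetD operators jt.1 "" = "*"
                then a * PySem.List.pyGetD row jt.1 0
                else a + PySem.List.pyGetD row jt.1 0) jt.2) := by
  induction xs with
  | nil =>
    intro tot
    simp only [List.foldl_nil]; exact (PySem.List.map_snd_enumerate tot 0).symm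
  | cons x xs ih =>
    intro tot
    rw [List.foldl_cons, ih, pvEnum_map_enum, List.map_map]
    rfl

-- fold of (· * g ·) from 1 is the product of the mapped list; same for sums
theorem pvFoldl_mul (g : List Int → Int) (xs : List (List Int)) :
    xs.foldl (fun a row => a * g row) 1 = (xs.map g).prod := by
  rw [List.prod_eq_foldl, List.foldl_map]

theorem pvFoldl_add (g : List Int → Int) (xs : List (List Int)) :
    xs.foldl (fun a row => a + g row) 0 = (xs.map g).sum := by
  rw [List.sum_eq_foldl, List.foldl_map]

-- ===== VERDICT (by name: the statement is the Claim_ definition above) =====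
theorem grand_total_spec : Claim_equal_grand_total := by
  intro operands operators _ hpre
  unfold Spec_grand_total grand_total grand_total_alt
  simp only []
  rw [pvB_fold]
  rcases hpre with h | ⟨hne, _⟩
  · subst h; simp [PySem.List.pyRange_one_eq_nil]
  · -- rewrite A's outer fold as a map over the column indices
    rw [PySem.List.foldl_append_singleton_eq_map
          (fun j =>
            let st :=
              (PySem.List.pyRange 0 operands.length 1).foldl
                (fun (st : List Int × Option String) i =>
                  (st.1 ++ [PySem.List.pyGetD (PySem.List.pyGetD operands i []) j 0],
                   some (PySem.List.pyGetD operators j "")))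
                ([], none)
            if st.2 = some "*" then st.1.prod else st.1.sum)]
    -- B's enumerate over the seed list as a map over the same column indices
    rw [PySem.List.enumerate_eq_map_pyRange (operators.map (fun op => if op = "*" then (1 : Int) else 0)) 0,
        List.map_map]
    simp only [List.nil_append, PySem.List.len_eq, List.length_map]
    congr 1
    apply List.map_congr_left
    intro j hj
    have hj' : 0 ≤ j ∧ j < (operators.length : Int) := by
      simpa using (PySem.List.mem_pyRange_one).1 hj
    obtain ⟨k, rfl⟩ : ∃ k : Nat, j = (k : Int) := ⟨j.toNat, (Int.toNat_of_nonneg hj'.1).symm⟩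
    have hk : k < operators.length := by exact_mod_cast hj'.2
    -- evaluate A's inner fold
    have hA := PySem.List.foldl_pyRange_zero_pyGetD operands []
      (fun (st : List Int × Option String) row =>
        (st.1 ++ [PySem.List.pyGetD row (k : Int) 0],
         some (PySem.List.pyGetD operators (k : Int) ""))) ([], none)
    simp only [PySem.List.len_eq] at hA
    rw [hA, pvA_inner_fold operators (k : Int) operands [] none]
    simp only [if_neg hne, List.nil_append, Option.some.injEq, Function.comp]
    -- the seed value at column k
    have hseed : PySem.List.pyGetD (operators.map (fun op => if op = "*" then (1 : Int) else 0)) (k : Int) 0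
        = (if operators[k] = "*" then (1 : Int) else 0) := by
      rw [PySem.List.pyGetD_natCast, List.getD_eq_getElem _ _ (by simpa using hk)]
      simp
    have hop : PySem.List.pyGetD operators (k : Int) "" = operators[k] := by
      rw [PySem.List.pyGetD_natCast, List.getD_eq_getElem _ _ hk]
    rw [hseed, hop]
    by_cases hstar : operators[k] = "*"
    · simp only [hstar, if_pos]
      exact (pvFoldl_mul (fun row => PySem.List.pyGetD row (k : Int) 0) operands).symm
    · simp only [if_neg hstar]
      exact (pvFoldl_add (fun row => PySem.List.pyGetD row (k : Int) 0) operands).symm
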